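-- pv_equiv track=rewrite | github.com/chapayM/algorytms | Lesson3/Les3Task6.py | sum_between_max_min
-- ===== SOURCE A (Python) =====
-- def sum_between_max_min(array):
--     # sort_array = sorted(array.copy())
--     # index_min, index_max = array.index(sort_array[0]), array.index(sort_array[-1])
--     # sort_array.clear()
--     max_el = array[0]
--     min_el = array[0]
--     i = 0
--     while i < len(array) - 1:
--         if max_el < array[i + 1]:
--             max_el = array[i + 1]
--         if min_el > array[i + 1]:
--             min_el = array[i + 1]
--         i += 1
--     index_min, index_max = array.index(min_el), array.index(max_el)
--     sum_res = 0
--     if index_min < index_max: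
--         for el in array[index_min + 1:index_max]:
--             sum_res += el
--     else:
--         for el in array[index_max + 1:index_min]:
--             sum_res += el
--     return sum_res
-- ===== SOURCE B (Python) =====
-- def sum_between_max_min(array):
--     n = len(array)
--     imn = sorted(range(n), key=lambda i: array[i])[0]
--     imx = sorted(range(n), key=lambda i: array[i], reverse=True)[0]
--     if imn < imx:
--         lo, hi = imn, imx
--     else:
--         lo, hi = imx, imn
--     return sum(array[lo + 1:hi])
-- ===== Notes on version B (the rewrite author's own statement) =====
-- stated objective: alternative
-- what changed: Replaces A's manual while-loop min/max scan, two .index scans and hand-accumulated slice loop by stable sorts of the index range (ascending head = first index of the min, descending head = first index of the max) and a builtin sum of the slice.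
import Mathlib
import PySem

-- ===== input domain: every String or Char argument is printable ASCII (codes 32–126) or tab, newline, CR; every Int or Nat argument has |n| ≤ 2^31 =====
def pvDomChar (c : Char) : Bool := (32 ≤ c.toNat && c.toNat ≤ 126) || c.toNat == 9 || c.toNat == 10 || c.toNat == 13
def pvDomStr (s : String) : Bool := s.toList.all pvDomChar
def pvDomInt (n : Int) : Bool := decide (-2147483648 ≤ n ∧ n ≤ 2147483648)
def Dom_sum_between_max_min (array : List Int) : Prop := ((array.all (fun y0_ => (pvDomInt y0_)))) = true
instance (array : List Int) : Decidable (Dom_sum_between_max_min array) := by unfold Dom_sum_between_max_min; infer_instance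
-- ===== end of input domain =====

-- B replaces A's manual while-loop min/max scan, two .index scans and hand-accumulated
-- slice loop by stable sorts of the index range plus a builtin slice sum; both raise
-- IndexError on the empty list, excluded by Pre_.


-- ===== PORT A =====
-- A's while loop over i = 0 .. len-2 reads array[i+1], i.e. it folds the max/min updates
-- over array.tail starting from (array[0], array[0]).
def aStep (p : Int × Int) (x : Int) : Int × Int :=
  (if p.1 < x then x else p.1, if p.2 > x then x else p.2)

def sum_between_max_min (array : List Int) : Int :=
  match array with
  | [] => 0  -- Python raises IndexError reading array[0]; excluded by Pre_
  | a :: rest =>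
    let mm := rest.foldl aStep (a, a)
    -- array.index: both elements occur in array, so the default 0 is never used
    let index_min : Int := ((PySem.List.index? array mm.2).getD 0 : Nat)
    let index_max : Int := ((PySem.List.index? array mm.1).getD 0 : Nat)
    if index_min < index_max then
      (PySem.List.slice array (some (index_min + 1)) (some index_max)).foldl (· + ·) 0
    else
      (PySem.List.slice array (some (index_max + 1)) (some index_min)).foldl (· + ·) 0

-- ===== PORT B =====
def sum_between_max_min_alt (array : List Int) : Int :=
  let n : Int := array.length
  -- lambda i: array[i] — every i produced by range(n) is in range, so the default 0 is never used
  let key : Int → Int := fun i => (PySem.List.pyGet? array i).getD 0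
  -- sorted(range(n), key)[0]: on the empty list Python raises IndexError; excluded by Pre_
  let imn : Int := (PySem.List.sorted (PySem.List.pyRange 0 n) key).headD 0
  let imx : Int := (PySem.List.sorted (PySem.List.pyRange 0 n) key true).headD 0
  let lo : Int := if imn < imx then imn else imx
  let hi : Int := if imn < imx then imx else imn
  (PySem.List.slice array (some (lo + 1)) (some hi)).sum

-- ===== PRECONDITION & SPEC =====
-- Pre_ excludes only the empty list, where both Pythons raise IndexError.
def Pre_sum_between_max_min (array : List Int) : Prop := array ≠ []
instance (array : List Int) : Decidable (Pre_sum_between_max_min array) := by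
  unfold Pre_sum_between_max_min; infer_instance

def pvWitness_sum_between_max_min : List Int := [1, 5, 2, 7, 3]

def Spec_sum_between_max_min (array : List Int) (out : Int) : Prop := out = sum_between_max_min_alt array
instance (array : List Int) (out : Int) : Decidable (Spec_sum_between_max_min array out) := by unfold Spec_sum_between_max_min; infer_instance

-- ===== CLAIM (what is proved, stated in full; the proofs are below) =====
def Claim_equal_sum_between_max_min : Prop := ∀ (array : List Int), Dom_sum_between_max_min array → Pre_sum_between_max_min array → Spec_sum_between_max_min array (sum_between_max_min array)

-- ===== LEMMAS AND PROOFS =====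

-- the head of an insertion step
lemma insertBy_cons (before : Int → Int → Bool) (x h : Int) (t : List Int) :
    PySem.List.insertBy before x (h :: t)
      = if before x h then x :: h :: t else h :: PySem.List.insertBy before x t := by
  rfl

-- head of an insertion sort started from a nonempty accumulator = a strict-first fold
lemma headD_foldl_insertBy (before : Int → Int → Bool) (l : List Int) :
    ∀ (h d : Int) (t : List Int),
      ((l.foldl (fun acc x => PySem.List.insertBy before x acc) (h :: t)).headD d)
        = l.foldl (fun m x => if before x m then x else m) h := by
  induction l with
  | nil => intro h d t; rfl
  | cons x l ih =>
    intro h d t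
    simp only [List.foldl_cons, insertBy_cons]
    by_cases hb : before x h
    · simp only [hb, if_true, ih]
    · simp only [hb, Bool.false_eq_true, if_false, ih]

lemma pyRange_nil (a b : Int) (h : b ≤ a) : PySem.List.pyRange a b = [] := by
  rw [PySem.List.pyRange_of_pos a b Int.zero_lt_one]
  simp [show ¬ a < b by omega]

-- head of sorted(range-like index list, key) as a strict-first fold over the tail
lemma headD_sorted (key : Int → Int) (i0 : Int) (is : List Int) (rev : Bool) (d : Int) :
    (PySem.List.sorted (i0 :: is) key rev).headD d
      = is.foldl (fun m i => if (if rev then key m < key i else key i < key m) then i else m) i0 := by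
  cases rev
  · rw [PySem.List.sorted_eq_foldl_insertBy]
    simp only [List.foldl_cons]
    have h0 : PySem.List.insertBy (fun a b => decide (key a < key b)) i0 ([] : List Int) = [i0] := rfl
    rw [h0, headD_foldl_insertBy]
    simp
  · rw [PySem.List.sorted_rev_eq_foldl_insertBy]
    simp only [List.foldl_cons]
    have h0 : PySem.List.insertBy (fun a b => decide (key b < key a)) i0 ([] : List Int) = [i0] := rfl
    rw [h0, headD_foldl_insertBy]
    simp

-- proof-side names for the strict-first min/max index folds read off the sorted heads
def fminStep (arr : List Int) (m i : Int) : Int :=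
  if (PySem.List.pyGet? arr i).getD 0 < (PySem.List.pyGet? arr m).getD 0 then i else m

def fmaxStep (arr : List Int) (m i : Int) : Int :=
  if (PySem.List.pyGet? arr m).getD 0 < (PySem.List.pyGet? arr i).getD 0 then i else m

lemma fminStep_def (arr : List Int) :
    (fun (m i : Int) => if (PySem.List.pyGet? arr i).getD 0 < (PySem.List.pyGet? arr m).getD 0 then i else m)
      = fminStep arr := rfl

lemma fmaxStep_def (arr : List Int) :
    (fun (m i : Int) => if (PySem.List.pyGet? arr m).getD 0 < (PySem.List.pyGet? arr i).getD 0 then i else m)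
      = fmaxStep arr := rfl

-- Main invariant: folding the strict-first min/max index updates over the remaining
-- indices lands on the first occurrence index of A's folded min/max value.
lemma idxFold_inv (l : List Int) : ∀ (a : Int) (pre : List Int) (mx mn : Int) (imx imn : Nat),
    (∀ y ∈ a :: pre, y ≤ mx) → (∀ y ∈ a :: pre, mn ≤ y) →
    PySem.List.index? (a :: pre) mx = some imx →
    PySem.List.index? (a :: pre) mn = some imn →
    mx = (pre.foldl aStep (a, a)).1 → mn = (pre.foldl aStep (a, a)).2 →
    ((PySem.List.pyRange (pre.length + 1) (a :: (pre ++ l)).length).foldl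
        (fminStep (a :: (pre ++ l))) (imn : Int)
      = (((PySem.List.index? (a :: (pre ++ l)) ((pre ++ l).foldl aStep (a, a)).2).getD 0 : Nat) : Int))
    ∧ ((PySem.List.pyRange (pre.length + 1) (a :: (pre ++ l)).length).foldl
        (fmaxStep (a :: (pre ++ l))) (imx : Int)
      = (((PySem.List.index? (a :: (pre ++ l)) ((pre ++ l).foldl aStep (a, a)).1).getD 0 : Nat) : Int)) := by
  induction l with
  | nil =>
    intro a pre mx mn imx imn hub hlb hix hin hmx hmn
    have hr : PySem.List.pyRange ((pre.length : Int) + 1) ((a :: (pre ++ [])).length : Int) = [] := by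
      apply pyRange_nil; simp
    rw [hr]
    simp only [List.foldl_nil, List.append_nil]
    rw [← hmx, ← hmn, hix, hin]
    simp
  | cons x l ih =>
    intro a pre mx mn imx imn hub hlb hix hin hmx hmn
    have hmem_mx : mx ∈ a :: pre := by
      have h : (PySem.List.index? (a :: pre) mx).isSome := by rw [hix]; rfl
      exact (PySem.List.index?_isSome_iff _ _).mp h
    have hmem_mn : mn ∈ a :: pre := by
      have h : (PySem.List.index? (a :: pre) mn).isSome := by rw [hin]; rfl
      exact (PySem.List.index?_isSome_iff _ _).mp h
    -- lookups of the current indices and of the new position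
    obtain ⟨hkx, hgx, -⟩ := PySem.List.getElem_of_index?_eq_some hix
    obtain ⟨hkn, hgn, -⟩ := PySem.List.getElem_of_index?_eq_some hin
    have harr : a :: (pre ++ x :: l) = (a :: pre) ++ (x :: l) := by simp
    have hkeyx : (PySem.List.pyGet? (a :: (pre ++ x :: l)) ((imx : Nat) : Int)).getD 0 = mx := by
      rw [PySem.List.pyGet?_natCast, harr, List.getElem?_append_left hkx]
      simp [List.getElem?_eq_getElem hkx, hgx]
    have hkeyn : (PySem.List.pyGet? (a :: (pre ++ x :: l)) ((imn : Nat) : Int)).getD 0 = mn := by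
      rw [PySem.List.pyGet?_natCast, harr, List.getElem?_append_left hkn]
      simp [List.getElem?_eq_getElem hkn, hgn]
    have hkeynew : (PySem.List.pyGet? (a :: (pre ++ x :: l)) ((pre.length : Int) + 1)).getD 0 = x := by
      have : ((pre.length : Int) + 1) = (((pre.length + 1 : Nat)) : Int) := by push_cast; ring
      rw [this, PySem.List.pyGet?_natCast, harr]
      have hlen : (a :: pre).length = pre.length + 1 := rfl
      rw [List.getElem?_append_right (by simp)]
      simp
    -- peel one index off the range
    have hlen2 : ((a :: (pre ++ x :: l)).length : Int) = (pre.length : Int) + 2 + l.length := by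
      simp; ring
    have hcons : PySem.List.pyRange ((pre.length : Int) + 1) ((a :: (pre ++ x :: l)).length : Int)
        = ((pre.length : Int) + 1) :: PySem.List.pyRange ((pre.length : Int) + 2) ((a :: (pre ++ x :: l)).length : Int) := by
      rw [PySem.List.pyRange_one_cons (by rw [hlen2]; omega)]
      have : ((pre.length : Int) + 1 + 1) = (pre.length : Int) + 2 := by ring
      rw [this]
    set P := (if mx < x then (x, pre.length + 1) else (mx, imx)) with hP
    set Q := (if x < mn then (x, pre.length + 1) else (mn, imn)) with hQ
    -- re-establish the invariant for pre ++ [x]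
    have hPub : ∀ y ∈ a :: (pre ++ [x]), y ≤ P.1 := by
      intro y hy
      have hy' : y ∈ a :: pre ∨ y = x := by
        rcases List.mem_cons.mp hy with h | h
        · exact Or.inl (h ▸ List.mem_cons_self)
        · rcases List.mem_append.mp h with h | h
          · exact Or.inl (List.mem_cons_of_mem _ h)
          · exact Or.inr (List.mem_singleton.mp h)
      by_cases h : mx < x <;> simp only [hP, h, ite_true, ite_false]
      · rcases hy' with h' | h'
        · exact le_of_lt (lt_of_le_of_lt (hub y h') h)
        · exact h' ▸ le_refl x
      · rcases hy' with h' | h'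
        · exact hub y h'
        · omega
    have hQlb : ∀ y ∈ a :: (pre ++ [x]), Q.1 ≤ y := by
      intro y hy
      have hy' : y ∈ a :: pre ∨ y = x := by
        rcases List.mem_cons.mp hy with h | h
        · exact Or.inl (h ▸ List.mem_cons_self)
        · rcases List.mem_append.mp h with h | h
          · exact Or.inl (List.mem_cons_of_mem _ h)
          · exact Or.inr (List.mem_singleton.mp h)
      by_cases h : x < mn <;> simp only [hQ, h, ite_true, ite_false]
      · rcases hy' with h' | h'
        · exact le_of_lt (lt_of_lt_of_le h (hlb y h'))
        · exact h' ▸ le_refl x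
      · rcases hy' with h' | h'
        · exact hlb y h'
        · omega
    have hcons2 : a :: (pre ++ [x]) = (a :: pre) ++ [x] := by simp
    have hPidx : PySem.List.index? (a :: (pre ++ [x])) P.1 = some P.2 := by
      by_cases h : mx < x
      · have hnot : x ∉ a :: pre := fun hx => absurd (hub x hx) (by omega)
        have h2 := PySem.List.index?_append_singleton_self _ _ hnot
        simp only [hP, h, ite_true]
        rw [hcons2, h2]
        simp
      · have h2 := PySem.List.index?_append_of_mem [x] hmem_mx
        simp only [hP, h, ite_false]
        rw [hcons2, h2, hix]
    have hQidx : PySem.List.index? (a :: (pre ++ [x])) Q.1 = some Q.2 := by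
      by_cases h : x < mn
      · have hnot : x ∉ a :: pre := fun hx => absurd (hlb x hx) (by omega)
        have h2 := PySem.List.index?_append_singleton_self _ _ hnot
        simp only [hQ, h, ite_true]
        rw [hcons2, h2]
        simp
      · have h2 := PySem.List.index?_append_of_mem [x] hmem_mn
        simp only [hQ, h, ite_false]
        rw [hcons2, h2, hin]
    have hPfold : P.1 = ((pre ++ [x]).foldl aStep (a, a)).1 := by
      rw [List.foldl_append]
      by_cases h : mx < x <;> simp only [hP, h, ite_true, ite_false, List.foldl_cons,
        List.foldl_nil, aStep, ← hmx]
    have hQfold : Q.1 = ((pre ++ [x]).foldl aStep (a, a)).2 := by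
      rw [List.foldl_append]
      by_cases h : x < mn <;> simp only [hQ, h, ite_true, ite_false, List.foldl_cons,
        List.foldl_nil, aStep, ← hmn]
    have hmain := ih a (pre ++ [x]) P.1 Q.1 P.2 Q.2 hPub hQlb hPidx hQidx hPfold hQfold
    have hassoc : (pre ++ [x]) ++ l = pre ++ x :: l := by simp
    rw [hassoc] at hmain
    have hlen3 : (((pre ++ [x]).length : Int) + 1) = ((pre.length : Int) + 2) := by
      simp; ring
    rw [hlen3] at hmain
    rw [hcons]
    have hstepn : fminStep (a :: (pre ++ x :: l)) (imn : Int) ((pre.length : Int) + 1)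
        = if x < mn then (pre.length : Int) + 1 else (imn : Int) := by
      unfold fminStep
      rw [hkeynew, hkeyn]
    have hstepx : fmaxStep (a :: (pre ++ x :: l)) (imx : Int) ((pre.length : Int) + 1)
        = if mx < x then (pre.length : Int) + 1 else (imx : Int) := by
      unfold fmaxStep
      rw [hkeynew, hkeyx]
    constructor
    · have h1 := hmain.1
      rw [List.foldl_cons, hstepn]
      by_cases h : x < mn
      · simp only [h, ite_true]
        have : ((Q.2 : Nat) : Int) = (pre.length : Int) + 1 := by
          simp only [hQ, h, ite_true]; push_cast; ring_nf
        rw [← this]; exact h1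
      · simp only [h, ite_false]
        have : ((Q.2 : Nat) : Int) = (imn : Int) := by simp only [hQ, h, ite_false]
        rw [← this]; exact h1
    · have h2 := hmain.2
      rw [List.foldl_cons, hstepx]
      by_cases h : mx < x
      · simp only [h, ite_true]
        have : ((P.2 : Nat) : Int) = (pre.length : Int) + 1 := by
          simp only [hP, h, ite_true]; push_cast; ring_nf
        rw [← this]; exact h2
      · simp only [h, ite_false]
        have : ((P.2 : Nat) : Int) = (imx : Int) := by simp only [hP, h, ite_false]
        rw [← this]; exact h2

-- ===== VERDICT (by name: the statement is the Claim_ definition above) =====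
theorem sum_between_max_min_spec : Claim_equal_sum_between_max_min := by
  intro array _ hpre
  unfold Spec_sum_between_max_min
  match array with
  | [] => exact absurd rfl hpre
  | a :: rest =>
    have hinv := idxFold_inv rest a [] a a 0 0
      (by intro y hy; simp at hy; omega) (by intro y hy; simp at hy; omega)
      (PySem.List.index?_cons_self a []) (PySem.List.index?_cons_self a [])
      rfl rfl
    simp only [List.nil_append, List.length_nil, Nat.cast_zero, Int.zero_add] at hinv
    obtain ⟨h1, h2⟩ := hinv
    simp only [sum_between_max_min, sum_between_max_min_alt]
    have hn : (0 : Int) < ((a :: rest).length : Int) := by simp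
    rw [PySem.List.pyRange_one_cons hn]
    rw [headD_sorted _ _ _ false, headD_sorted _ _ _ true]
    simp only [Bool.false_eq_true, if_false, if_true]
    norm_num at h1 h2 ⊢
    rw [fminStep_def, fmaxStep_def, h1, h2]
    set jmn : Nat := (List.idxOf? (rest.foldl aStep (a, a)).2 (a :: rest)).getD 0 with hjmn
    set jmx : Nat := (List.idxOf? (rest.foldl aStep (a, a)).1 (a :: rest)).getD 0 with hjmx
    by_cases h : jmn < jmx
    · have h' : ((jmn : Int) < (jmx : Int)) := by exact_mod_cast h
      rw [if_pos h, if_pos h', if_pos h', List.sum_eq_foldl]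
    · have h' : ¬ ((jmn : Int) < (jmx : Int)) := by exact_mod_cast h
      rw [if_neg h, if_neg h', if_neg h', List.sum_eq_foldl]
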